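-- pv_equiv track=rewrite | github.com/coditect-ai/coditect-dev-generative-ui-development | submodules/core/coditect-core/llm_abstractions/search_augmented_llm.py | _inject_search_context
-- ===== SOURCE A (Python) =====
-- from typing import Any, Dict, List, Optional
--
-- def _inject_search_context(
--
--     messages: List[Dict[str, str]],
--     search_results: List[Dict[str, str]]
-- ) -> List[Dict[str, str]]:
--     """
--     Inject search results into message context.
--
--     Args:
--         messages: Original messages
--         search_results: Search results to inject
--
--     Returns:
--         Updated messages with search context
--     """
--     # Format search results
--     context = "\n\n**Web Search Results:**\n\n"
--     for i, result in enumerate(search_results, 1):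
--         context += f"{i}. **{result['title']}**\n"
--         context += f"   {result['snippet']}\n"
--         context += f"   Source: {result['url']}\n\n"
--
--     # Find system message or create one
--     augmented_messages = []
--     system_added = False
--
--     for msg in messages:
--         if msg.get("role") == "system" and not system_added:
--             # Append to existing system message
--             augmented_messages.append({
--                 "role": "system",
--                 "content": msg.get("content", "") + "\n\n" + context
--             })
--             system_added = True
--         elif msg.get("role") == "user" and not system_added:
--             # Insert system message before first user message
--             augmented_messages.append({
--                 "role": "system",
--                 "content": context
--             })
--             system_added = True
--             augmented_messages.append(msg)
--         else:
--             augmented_messages.append(msg)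
--
--     # If no user message yet, prepend system message
--     if not system_added:
--         augmented_messages.insert(0, {
--             "role": "system",
--             "content": context
--         })
--
--     return augmented_messages
-- ===== SOURCE B (Python) =====
-- from typing import Any, Dict, List, Optional
--
-- def _inject_search_context(
--     messages: List[Dict[str, str]],
--     search_results: List[Dict[str, str]]
-- ) -> List[Dict[str, str]]:
--     # Format search results (same formatting as before)
--     context = "\n\n**Web Search Results:**\n\n"
--     for i, result in enumerate(search_results, 1):
--         context += f"{i}. **{result['title']}**\n"
--         context += f"   {result['snippet']}\n"
--         context += f"   Source: {result['url']}\n\n"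
--
--     # Locate the first system/user message, then rebuild by slicing.
--     idx = next((i for i, m in enumerate(messages)
--                 if m.get("role") in ("system", "user")), None)
--     if idx is None:
--         return [{"role": "system", "content": context}] + messages
--     m = messages[idx]
--     if m.get("role") == "system":
--         return (messages[:idx]
--                 + [{"role": "system",
--                     "content": m.get("content", "") + "\n\n" + context}]
--                 + messages[idx + 1:])
--     return (messages[:idx]
--             + [{"role": "system", "content": context}, m]
--             + messages[idx + 1:])
-- ===== Notes on version B (the rewrite author's own statement) =====
-- stated objective: simpler
-- what changed: Replaces the flag-driven accumulator loop over all messages with a find-first-index of the first system/user message followed by slice-based reconstruction (prefix ++ replacement ++ suffix).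
-- outside the precondition, e.g. on _inject_search_context([], [{}]): A raises KeyError, B raises KeyError
import Mathlib
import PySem

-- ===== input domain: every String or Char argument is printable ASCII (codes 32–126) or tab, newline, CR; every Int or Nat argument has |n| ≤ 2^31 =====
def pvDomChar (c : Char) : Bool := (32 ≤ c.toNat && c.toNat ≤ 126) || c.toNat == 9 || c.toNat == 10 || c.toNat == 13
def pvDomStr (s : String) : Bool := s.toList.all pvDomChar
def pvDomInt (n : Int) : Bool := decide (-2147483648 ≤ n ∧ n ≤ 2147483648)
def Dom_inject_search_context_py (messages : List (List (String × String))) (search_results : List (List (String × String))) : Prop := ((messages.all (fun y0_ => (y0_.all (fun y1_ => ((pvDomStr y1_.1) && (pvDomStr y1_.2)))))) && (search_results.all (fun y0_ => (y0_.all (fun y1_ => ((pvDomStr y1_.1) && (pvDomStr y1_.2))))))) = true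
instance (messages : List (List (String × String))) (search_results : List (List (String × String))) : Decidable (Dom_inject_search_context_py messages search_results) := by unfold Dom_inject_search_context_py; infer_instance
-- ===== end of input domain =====

-- B replaces A's flag-driven single loop by find-first-anchor-index + slice reconstruction (objective: simpler decomposition, same cost).

-- ===== PORT A =====
-- msg.get(k) / msg.get(k, dflt) on an association-list dict (wraps PySem.Dict).
def pvGet? (d : List (String × String)) (k : String) : Option String := PySem.Dict.get? (PySem.Dict.mk d) k
def pvGetD (d : List (String × String)) (k dflt : String) : String := PySem.Dict.getD (PySem.Dict.mk d) k dflt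
-- Context formatting (identical lines in both Pythons; Pre_ guarantees the
-- 'title'/'snippet'/'url' keys exist, so getD with default "" is exact here —
-- Python raises KeyError exactly on the inputs Pre_ excludes).
def pvContext (search_results : List (List (String × String))) : String :=
  (search_results.foldl
    (fun (st : String × Int) r =>
      (st.1 ++ PySem.Int.toStr st.2 ++ ". **" ++ pvGetD r "title" "" ++ "**\n"
            ++ "   " ++ pvGetD r "snippet" "" ++ "\n"
            ++ "   Source: " ++ pvGetD r "url" "" ++ "\n\n", st.2 + 1))
    ("\n\n**Web Search Results:**\n\n", 1)).1

-- A's message loop, as structural recursion over the same state (built list, system_added flag).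
def pvLoopA (c : String) : List (List (String × String)) → Bool → (List (List (String × String)) × Bool)
  | [], added => ([], added)
  | msg :: rest, added =>
    if pvGet? msg "role" == some "system" && !added then
      let p := pvLoopA c rest true
      ([("role", "system"), ("content", pvGetD msg "content" "" ++ "\n\n" ++ c)] :: p.1, p.2)
    else if pvGet? msg "role" == some "user" && !added then
      let p := pvLoopA c rest true
      ([("role", "system"), ("content", c)] :: msg :: p.1, p.2)
    else
      let p := pvLoopA c rest added
      (msg :: p.1, p.2)

def inject_search_context_py (messages : List (List (String × String))) (search_results : List (List (String × String))) : List (List (String × String)) :=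
  let context := pvContext search_results
  let p := pvLoopA context messages false
  if p.2 then p.1 else [("role", "system"), ("content", context)] :: p.1

-- ===== PORT B =====
-- m.get("role") in ("system", "user")
def pvIsAnchor (msg : List (String × String)) : Bool :=
  pvGet? msg "role" == some "system" || pvGet? msg "role" == some "user"

def inject_search_context_py_alt (messages : List (List (String × String))) (search_results : List (List (String × String))) : List (List (String × String)) :=
  let context := pvContext search_results
  match messages.findIdx? pvIsAnchor with
  | none => [("role", "system"), ("content", context)] :: messages
  | some i =>
    let m := messages.getD i []   -- i is a valid index produced by findIdx?
    if pvGet? m "role" == some "system" then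
      messages.take i
        ++ [[("role", "system"), ("content", pvGetD m "content" "" ++ "\n\n" ++ context)]]
        ++ messages.drop (i + 1)
    else
      messages.take i
        ++ [[("role", "system"), ("content", context)], m]
        ++ messages.drop (i + 1)

-- ===== PRECONDITION & SPEC =====
-- Pre_ excludes inputs where a search result lacks the 'title', 'snippet' or 'url' key:
-- there Python A (and B) raise KeyError and return nothing.
def Pre_inject_search_context_py (messages : List (List (String × String))) (search_results : List (List (String × String))) : Prop :=
  search_results.all (fun r =>
    (pvGet? r "title").isSome && (pvGet? r "snippet").isSome
      && (pvGet? r "url").isSome) = true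
instance (messages : List (List (String × String))) (search_results : List (List (String × String))) : Decidable (Pre_inject_search_context_py messages search_results) := by unfold Pre_inject_search_context_py; infer_instance

def pvWitness_inject_search_context_py : (List (List (String × String))) × (List (List (String × String))) :=
  ([[("role", "user"), ("content", "hi")]], [[("title", "T"), ("snippet", "S"), ("url", "U")]])

def Spec_inject_search_context_py (messages : List (List (String × String))) (search_results : List (List (String × String))) (out : List (List (String × String))) : Prop := out = inject_search_context_py_alt messages search_results
instance (messages : List (List (String × String))) (search_results : List (List (String × String))) (out : List (List (String × String))) : Decidable (Spec_inject_search_context_py messages search_results out) := by unfold Spec_inject_search_context_py; infer_instance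

-- ===== CLAIM (what is proved, stated in full; the proofs are below) =====
def Claim_equal_inject_search_context_py : Prop := ∀ (messages : List (List (String × String))) (search_results : List (List (String × String))), Dom_inject_search_context_py messages search_results → Pre_inject_search_context_py messages search_results → Spec_inject_search_context_py messages search_results (inject_search_context_py messages search_results)

-- ===== LEMMAS AND PROOFS =====

-- Once the flag is set, A's loop copies the remaining messages unchanged.
theorem pvLoopA_true (c : String) (ms : List (List (String × String))) :
    pvLoopA c ms true = (ms, true) := by
  induction ms with
  | nil => rfl
  | cons m rest ih => simp [pvLoopA, ih]

-- A's flag-false loop, characterised by the first anchor index (the core of the equivalence).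
theorem pvLoopA_false (c : String) (ms : List (List (String × String))) :
    pvLoopA c ms false =
    (match ms.findIdx? pvIsAnchor with
     | none => (ms, false)
     | some i =>
       let m := ms.getD i []
       if pvGet? m "role" == some "system" then
         (ms.take i ++ [[("role", "system"), ("content", pvGetD m "content" "" ++ "\n\n" ++ c)]] ++ ms.drop (i + 1), true)
       else
         (ms.take i ++ [[("role", "system"), ("content", c)], m] ++ ms.drop (i + 1), true)) := by
  induction ms with
  | nil => rfl
  | cons m rest ih =>
    by_cases hs : pvGet? m "role" = some "system"
    · simp [pvLoopA, hs, List.findIdx?_cons, pvIsAnchor, pvLoopA_true]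
    · by_cases hu : pvGet? m "role" = some "user"
      · simp [pvLoopA, hu, List.findIdx?_cons, pvIsAnchor, pvLoopA_true]
      · cases hf : rest.findIdx? pvIsAnchor with
        | none =>
          simp [pvLoopA, hs, hu, List.findIdx?_cons, pvIsAnchor, hf, ih]
        | some i =>
          simp [pvLoopA, hs, hu, List.findIdx?_cons, pvIsAnchor, hf, ih]
          split_ifs <;> simp

-- ===== VERDICT (by name: the statement is the Claim_ definition above) =====
theorem inject_search_context_py_spec : Claim_equal_inject_search_context_py := by
  intro messages search_results _ _
  unfold Spec_inject_search_context_py inject_search_context_py inject_search_context_py_alt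
  simp only []
  rw [pvLoopA_false]
  cases hf : messages.findIdx? pvIsAnchor with
  | none => simp [hf]
  | some i =>
    simp only [hf]
    split_ifs <;> simp_all
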